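-- pv_equiv track=rewrite | github.com/hnyoojin/chim-boogie | week3/yoojin/prob3.py | find_min_sequence
-- ===== SOURCE A (Python) =====
-- def is_valid(sequence):
--     length = len(sequence)
--
--     for i in range(1, length // 2 + 1):
--         if sequence[length - i:] == sequence[length - 2*i:length - i]:
--             return False
--
--     return True
--
-- def find_min_sequence(n):
--     sequence = []
--
--     def backtrack():
--         if len(sequence) == n:
--             return True
--
--         for num in [4, 5, 6]:
--             sequence.append(num)
--
--             if is_valid(sequence):
--                 if backtrack():
--                     return True
--
--             sequence.pop()
--
--         return False
--
--     backtrack()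
--     return sequence
-- ===== SOURCE B (Python) =====
-- def _square_at_end(seq):
--     # does seq end with a repeated block?  index-based comparison with early exit
--     L = len(seq)
--     i = 1
--     while 2 * i <= L:
--         t = 0
--         while t < i and seq[L - 1 - t] == seq[L - 1 - i - t]:
--             t += 1
--         if t == i:
--             return True
--         i += 1
--     return False
--
-- def find_min_sequence(n):
--     # iterative odometer-style backtracking: the partial sequence itself is the
--     # stack; cand is the next digit to try at the current position; a dead end
--     # pops the last digit and resumes from its successor.
--     seq = []
--     cand = 4
--     while len(seq) < n:
--         if cand <= 6:
--             seq.append(cand)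
--             if _square_at_end(seq):
--                 seq.pop()
--                 cand += 1
--             else:
--                 cand = 4
--         else:
--             if not seq:
--                 return seq
--             cand = seq.pop() + 1
--     return seq
-- ===== Notes on version B (the rewrite author's own statement) =====
-- stated objective: alternative
-- what changed: B replaces A's recursive closure-based DFS (append, recurse, pop) by an iterative odometer-style loop in which the partial sequence itself serves as the backtracking stack (dead end = pop last digit and resume from its successor), and replaces the slice-copying suffix check by an index-based element comparison with early exit.
import Mathlib
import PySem

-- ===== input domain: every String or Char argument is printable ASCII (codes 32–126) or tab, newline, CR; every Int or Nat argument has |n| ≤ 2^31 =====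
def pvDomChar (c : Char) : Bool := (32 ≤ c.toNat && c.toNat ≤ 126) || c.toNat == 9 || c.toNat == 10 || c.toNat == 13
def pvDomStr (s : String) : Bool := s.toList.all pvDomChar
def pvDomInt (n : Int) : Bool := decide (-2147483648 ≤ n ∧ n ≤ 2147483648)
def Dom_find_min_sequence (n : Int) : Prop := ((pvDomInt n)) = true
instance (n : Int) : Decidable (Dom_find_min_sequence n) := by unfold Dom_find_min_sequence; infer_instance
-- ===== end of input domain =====

-- B replaces A's recursive closure-based DFS by an iterative odometer-style loop (the partial
-- sequence itself is the backtracking stack) with an index-based early-exit repetition check;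
-- objective: alternative (same asymptotic cost).

-- ===== PORT A =====
-- is_valid(sequence): scan i = 1 .. len//2, compare the two trailing slices
def pv_is_valid (seq : List Int) : Bool :=
  let length : Int := (seq.length : Int)
  (PySem.List.pyRange 1 (PySem.Int.floordiv length 2 + 1) 1).all (fun i =>
    !(PySem.List.slice seq (some (length - i)) none ==
      PySem.List.slice seq (some (length - 2*i)) (some (length - i))))

-- backtrack(): fuel makes the recursion total; for 0 ≤ n the fuel n.toNat+1 is never exhausted
-- (each level appends one element and stops at length n). The fold over [4,5,6] carries the
-- early-`return True` as the Bool flag; a failed recursive call restores the sequence (A pops).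
def pv_backtrack (fuel : Nat) (n : Int) (seq : List Int) : Bool × List Int :=
  match fuel with
  | 0 => (false, seq)
  | Nat.succ f =>
    if (seq.length : Int) = n then (true, seq)
    else
      [4, 5, 6].foldl (fun acc num =>
        if acc.1 then acc
        else
          let s := seq ++ [num]
          if pv_is_valid s then
            let r := pv_backtrack f n s
            if r.1 then r else (false, seq)
          else (false, seq)) (false, seq)

def find_min_sequence (n : Int) : List Int :=
  (pv_backtrack (n.toNat + 1) n []).2

-- ===== PORT B =====
-- _square_at_end(seq): inner while loop — advance t while elements from the end match
def pv_mrun (seq : List Int) (L i t : Int) (fuel : Nat) : Int :=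
  match fuel with
  | 0 => t
  | Nat.succ f =>
    if t < i then
      if PySem.List.pyGet? seq (L - 1 - t) == PySem.List.pyGet? seq (L - 1 - i - t) then
        pv_mrun seq L i (t + 1) f
      else t
    else t

-- _square_at_end(seq): outer while loop over block length i; fuel = number of iterations
def pv_srun (seq : List Int) (L i : Int) (fuel : Nat) : Bool :=
  match fuel with
  | 0 => false
  | Nat.succ f =>
    if 2 * i ≤ L then
      if pv_mrun seq L i 0 i.toNat == i then true
      else pv_srun seq L (i + 1) f
    else false

def pv_sq_at_end (seq : List Int) : Bool :=
  pv_srun seq (seq.length : Int) 1 (seq.length / 2)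

-- the main while loop of B; fuel bounds the number of iterations (proved sufficient below)
def pv_loop (fuel : Nat) (n : Int) (seq : List Int) (cand : Int) : List Int :=
  match fuel with
  | 0 => seq
  | Nat.succ f =>
    if (seq.length : Int) < n then
      if cand ≤ 6 then
        if pv_sq_at_end (seq ++ [cand]) then pv_loop f n seq (cand + 1)
        else pv_loop f n (seq ++ [cand]) 4
      else if seq.isEmpty then seq
      else pv_loop f n seq.dropLast (seq.getLastD 0 + 1)
    else seq

def find_min_sequence_alt (n : Int) : List Int :=
  pv_loop (4 ^ (n.toNat + 3)) n [] 4

-- ===== PRECONDITION & SPEC =====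
-- Pre_ excludes negative n, on which A's recursion never reaches the target length and raises
-- RecursionError; B's loop condition is immediately false there and it returns the empty list.
def Pre_find_min_sequence (n : Int) : Prop := 0 ≤ n
instance (n : Int) : Decidable (Pre_find_min_sequence n) := by unfold Pre_find_min_sequence; infer_instance
def pvWitness_find_min_sequence : Int := (3)

def Spec_find_min_sequence (n : Int) (out : List Int) : Prop := out = find_min_sequence_alt n
instance (n : Int) (out : List Int) : Decidable (Spec_find_min_sequence n out) := by unfold Spec_find_min_sequence; infer_instance

-- ===== CLAIM (what is proved, stated in full; the proofs are below) =====
def Claim_equal_find_min_sequence : Prop := ∀ (n : Int), Dom_find_min_sequence n → Pre_find_min_sequence n → Spec_find_min_sequence n (find_min_sequence n)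
-- ===== LEMMAS AND PROOFS =====

-- the common reference search: first square-free completion, as an Option-valued recursion
def pvStepF (g : Int → Option (List Int)) : Option (List Int) → Int → Option (List Int) :=
  fun acc num => match acc with | some r => some r | none => g num

def pvExt (fuel : Nat) (n : Int) (seq : List Int) : Option (List Int) :=
  match fuel with
  | 0 => none
  | Nat.succ f =>
    if (seq.length : Int) = n then some seq
    else
      [4, 5, 6].foldl
        (pvStepF (fun num => if pv_is_valid (seq ++ [num]) then pvExt f n (seq ++ [num]) else none))
        none

def pvExtC (n : Int) (s : List Int) : Option (List Int) := pvExt ((n - s.length).toNat + 1) n s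

def pvTry (n : Int) (seq : List Int) (cand : Int) : Option (List Int) :=
  (([4, 5, 6] : List Int).filter (fun v => decide (cand ≤ v))).foldl
    (pvStepF (fun num => if pv_is_valid (seq ++ [num]) then pvExtC n (seq ++ [num]) else none))
    none

def pvC (k : Nat) : Nat := 4 ^ (k + 2)

theorem pvFold_some (g : Int → Option (List Int)) (l : List Int) (r : List Int) :
    l.foldl (pvStepF g) (some r) = some r := by
  induction l with
  | nil => rfl
  | cons x xs ih => simp [pvStepF, ih]

theorem pvFold_congr (g₁ g₂ : Int → Option (List Int)) (l : List Int)
    (h : ∀ x ∈ l, g₁ x = g₂ x) : ∀ acc, l.foldl (pvStepF g₁) acc = l.foldl (pvStepF g₂) acc := by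
  induction l with
  | nil => intro acc; rfl
  | cons x xs ih =>
    intro acc
    simp only [List.foldl_cons]
    have hx : pvStepF g₁ acc x = pvStepF g₂ acc x := by
      cases acc <;> simp [pvStepF, h x (by simp)]
    rw [hx]
    exact ih (fun y hy => h y (by simp [hy])) _

theorem pvExtC_unfold (n : Int) (seq : List Int) (h : (seq.length : Int) < n) :
    pvExtC n seq = pvTry n seq 4 := by
  unfold pvExtC pvTry
  obtain ⟨k, hkeq⟩ : ∃ k, (n - seq.length).toNat = k + 1 := ⟨(n - seq.length).toNat - 1, by omega⟩
  rw [hkeq, pvExt, if_neg (by omega)]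
  rw [show (([4, 5, 6] : List Int).filter (fun v => decide ((4:Int) ≤ v))) = [4, 5, 6] from by decide]
  apply pvFold_congr
  intro x _
  show (if pv_is_valid (seq ++ [x]) then pvExt (k + 1) n (seq ++ [x]) else none) =
    (if pv_is_valid (seq ++ [x]) then pvExtC n (seq ++ [x]) else none)
  split_ifs with hv
  · unfold pvExtC
    by_cases hend : ((seq ++ [x]).length : Int) = n
    · have h0 : (n - ((seq ++ [x]).length : Int)).toNat = 0 := by omega
      rw [h0]
      rw [pvExt, pvExt, if_pos hend, if_pos hend]
    · have hlt' : ((seq ++ [x]).length : Int) < n := by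
        simp only [List.length_append, List.length_cons, List.length_nil] at hend ⊢
        omega
      have hkc : (n - ((seq ++ [x]).length : Int)).toNat = k := by
        simp only [List.length_append, List.length_cons, List.length_nil] at hkeq ⊢
        omega
      rw [hkc]
  · rfl

theorem pvTry_seven (n : Int) (seq : List Int) : pvTry n seq 7 = none := by
  unfold pvTry
  rw [show (([4, 5, 6] : List Int).filter (fun v => decide ((7:Int) ≤ v))) = [] from by decide]
  rfl

theorem pvTry_cons (n : Int) (seq : List Int) (cand : Int) (h4 : 4 ≤ cand) (h6 : cand ≤ 6) :
    pvTry n seq cand =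
      match (if pv_is_valid (seq ++ [cand]) then pvExtC n (seq ++ [cand]) else none) with
      | some r => some r
      | none => pvTry n seq (cand + 1) := by
  have hf : (([4, 5, 6] : List Int).filter (fun v => decide (cand ≤ v))) =
      cand :: (([4, 5, 6] : List Int).filter (fun v => decide (cand + 1 ≤ v))) := by
    have : cand = 4 ∨ cand = 5 ∨ cand = 6 := by omega
    rcases this with h | h | h <;> subst h <;> decide
  unfold pvTry
  rw [hf, List.foldl_cons]
  cases hg : (if pv_is_valid (seq ++ [cand]) then pvExtC n (seq ++ [cand]) else none) with
  | some r =>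
    have hs : pvStepF (fun num => if pv_is_valid (seq ++ [num]) then pvExtC n (seq ++ [num]) else none)
        none cand = some r := hg
    rw [hs]
    exact pvFold_some _ _ _
  | none =>
    have hs : pvStepF (fun num => if pv_is_valid (seq ++ [num]) then pvExtC n (seq ++ [num]) else none)
        none cand = none := hg
    rw [hs]

-- ===== A-side: the backtracking equals the reference search =====
theorem pv_fold_rel (f : Nat) (n : Int) (seq : List Int)
    (ih : ∀ s : List Int, pv_backtrack f n s =
      (match pvExt f n s with | some r => (true, r) | none => (false, s))) :
    ∀ (nums : List Int) (acc : Bool × List Int) (o : Option (List Int)),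
      (acc = match o with | some r => (true, r) | none => (false, seq)) →
      nums.foldl (fun acc num =>
        if acc.1 then acc
        else
          let s := seq ++ [num]
          if pv_is_valid s then
            let r := pv_backtrack f n s
            if r.1 then r else (false, seq)
          else (false, seq)) acc =
      (match nums.foldl
          (pvStepF (fun num => if pv_is_valid (seq ++ [num]) then pvExt f n (seq ++ [num]) else none)) o with
       | some r => (true, r)
       | none => (false, seq)) := by
  intro nums
  induction nums with
  | nil => intro acc o h; simpa using h
  | cons num rest ihn =>
    intro acc o h
    simp only [List.foldl_cons]
    apply ihn
    cases o with
    | some r => subst h; rfl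
    | none =>
      subst h
      simp only [Bool.false_eq_true, if_false]
      by_cases hv : pv_is_valid (seq ++ [num])
      · simp only [hv, if_true]
        rw [ih (seq ++ [num])]
        cases hE : pvExt f n (seq ++ [num]) <;> simp [pvStepF, hv, hE]
      · simp [pvStepF, hv]

theorem pv_backtrack_eq (fuel : Nat) (n : Int) (seq : List Int) :
    pv_backtrack fuel n seq =
      (match pvExt fuel n seq with | some r => (true, r) | none => (false, seq)) := by
  induction fuel generalizing seq with
  | zero => simp [pv_backtrack, pvExt]
  | succ f ih =>
    rw [pv_backtrack, pvExt]
    by_cases hl : (seq.length : Int) = n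
    · simp [hl]
    · simp only [hl, if_false]
      exact pv_fold_rel f n seq ih [4, 5, 6] (false, seq) none rfl

theorem find_min_sequence_eq_ext (n : Int) :
    find_min_sequence n =
      (match pvExt (n.toNat + 1) n [] with | some r => r | none => []) := by
  unfold find_min_sequence
  rw [pv_backtrack_eq]
  cases pvExt (n.toNat + 1) n [] <;> rfl

-- ===== the two repetition checks agree =====
theorem pv_mrun_iff (s : List Int) (L i : Int) :
    ∀ (fuel : Nat) (t : Int), 0 ≤ t → t ≤ i → (i - t).toNat = fuel →
    ((pv_mrun s L i t fuel = i) ↔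
      ∀ u : Int, t ≤ u → u < i →
        PySem.List.pyGet? s (L - 1 - u) = PySem.List.pyGet? s (L - 1 - i - u)) := by
  intro fuel
  induction fuel with
  | zero =>
    intro t h0 h1 h2
    have ht : t = i := by omega
    subst ht
    constructor
    · intro _ u hu1 hu2; omega
    · intro _; rfl
  | succ f ihf =>
    intro t h0 h1 h2
    have hti : t < i := by omega
    rw [pv_mrun, if_pos hti]
    cases hbeq : (PySem.List.pyGet? s (L - 1 - t) == PySem.List.pyGet? s (L - 1 - i - t)) with
    | true =>
      simp only [if_true]
      rw [ihf (t + 1) (by omega) (by omega) (by omega)]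
      constructor
      · intro h u hu1 hu2
        rcases eq_or_lt_of_le hu1 with h' | h'
        · subst h'; exact beq_iff_eq.mp hbeq
        · exact h u (by omega) hu2
      · intro h u hu1 hu2; exact h u (by omega) hu2
    | false =>
      simp only [Bool.false_eq_true, if_false]
      constructor
      · intro h; omega
      · intro h
        exfalso
        have := h t (le_refl t) hti
        rw [this] at hbeq
        simp at hbeq

theorem pv_mrun_spec (s : List Int) (k : Nat) (h1 : 1 ≤ k) (h2 : 2 * k ≤ s.length) :
    (pv_mrun s (s.length : Int) (k : Int) 0 ((k : Int)).toNat = (k : Int)) ↔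
    ∀ tn : Nat, tn < k → s[s.length - 1 - tn]? = s[s.length - 1 - k - tn]? := by
  rw [pv_mrun_iff s (s.length : Int) (k : Int) ((k : Int)).toNat 0 (by omega) (by omega) (by omega)]
  constructor
  · intro h tn htn
    have := h (tn : Int) (by omega) (by omega)
    rw [show (s.length : Int) - 1 - (tn : Int) = ((s.length - 1 - tn : Nat) : Int) from by omega,
        show (s.length : Int) - 1 - (k : Int) - (tn : Int) = ((s.length - 1 - k - tn : Nat) : Int) from by omega]
      at this
    simpa only [PySem.List.pyGet?_natCast] using this
  · intro h u hu1 hu2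
    obtain ⟨tn, rfl⟩ : ∃ tn : Nat, u = (tn : Int) := ⟨u.toNat, by omega⟩
    have := h tn (by omega)
    rw [show (s.length : Int) - 1 - (tn : Int) = ((s.length - 1 - tn : Nat) : Int) from by omega,
        show (s.length : Int) - 1 - (k : Int) - (tn : Int) = ((s.length - 1 - k - tn : Nat) : Int) from by omega]
    simpa only [PySem.List.pyGet?_natCast] using this

theorem pv_sliceeq_iff (s : List Int) (k : Nat) (h1 : 1 ≤ k) (h2 : 2 * k ≤ s.length) :
    ((PySem.List.slice s (some ((s.length : Int) - (k : Int))) none ==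
      PySem.List.slice s (some ((s.length : Int) - 2 * (k : Int))) (some ((s.length : Int) - (k : Int)))) = true) ↔
    ∀ tn : Nat, tn < k → s[s.length - 1 - tn]? = s[s.length - 1 - k - tn]? := by
  rw [show (s.length : Int) - (k : Int) = ((s.length - k : Nat) : Int) from by omega,
      show (s.length : Int) - 2 * (k : Int) = ((s.length - 2 * k : Nat) : Int) from by omega,
      PySem.List.slice_from_natCast, PySem.List.slice_natCast]
  rw [show s.length - k - (s.length - 2 * k) = k from by omega]
  rw [beq_iff_eq]
  have hA : (s.drop (s.length - k) = (s.drop (s.length - 2*k)).take k) ↔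
      ∀ u : Nat, u < k → s[s.length - k + u]? = s[s.length - 2*k + u]? := by
    constructor
    · intro h u hu
      have := congrArg (fun l => l[u]?) h
      simpa [List.getElem?_drop, List.getElem?_take, hu] using this
    · intro h
      apply List.ext_getElem?
      intro u
      by_cases hu : u < k
      · simpa [List.getElem?_drop, List.getElem?_take, hu] using h u hu
      · have l1 : s[s.length - k + u]? = none := by
          apply List.getElem?_eq_none; omega
        simp [List.getElem?_drop, hu, l1]
  rw [hA]
  constructor
  · intro h tn htn
    have := h (k - 1 - tn) (by omega)
    rw [show s.length - k + (k - 1 - tn) = s.length - 1 - tn from by omega,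
        show s.length - 2*k + (k - 1 - tn) = s.length - 1 - k - tn from by omega] at this
    exact this
  · intro h u hu
    have := h (k - 1 - u) (by omega)
    rw [show s.length - 1 - (k - 1 - u) = s.length - k + u from by omega,
        show s.length - 1 - k - (k - 1 - u) = s.length - 2*k + u from by omega] at this
    exact this

theorem pv_srun_eq (s : List Int) (Lnat : Nat) :
    ∀ (fuel : Nat) (i : Int), 1 ≤ i → i + (fuel : Int) = ((Lnat / 2 : Nat) : Int) + 1 →
    pv_srun s (Lnat : Int) i fuel =
      (PySem.List.pyRange i (((Lnat / 2 : Nat) : Int) + 1) 1).any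
        (fun j => pv_mrun s (Lnat : Int) j 0 j.toNat == j) := by
  intro fuel
  induction fuel with
  | zero =>
    intro i h1 h2
    rw [PySem.List.pyRange_one_eq_nil (by omega)]
    rfl
  | succ f ih =>
    intro i h1 h2
    have hdiv : 2 * (Lnat / 2) ≤ Lnat := by omega
    have h2i : 2 * i ≤ (Lnat : Int) := by omega
    rw [PySem.List.pyRange_one_cons (by omega)]
    rw [pv_srun, if_pos h2i]
    simp only [List.any_cons]
    cases hm : (pv_mrun s (Lnat : Int) i 0 i.toNat == i) with
    | true => simp
    | false =>
      simp only [Bool.false_or]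
      exact ih (i + 1) (by omega) (by omega)

theorem pv_valid_eq (s : List Int) : pv_is_valid s = ! pv_sq_at_end s := by
  simp only [pv_is_valid, pv_sq_at_end]
  have hfd : PySem.Int.floordiv (s.length : Int) 2 = ((s.length / 2 : Nat) : Int) := by
    exact_mod_cast PySem.Int.floordiv_natCast s.length 2
  rw [hfd, pv_srun_eq s s.length (s.length / 2) 1 (by omega) (by omega)]
  rw [List.all_eq_not_any_not]
  simp only [Bool.not_not]
  congr 1
  apply PySem.List.any_congr_mem
  intro i hi
  rw [PySem.List.mem_pyRange_one] at hi
  obtain ⟨hi1, hi2⟩ := hi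
  obtain ⟨k, rfl⟩ : ∃ k : Nat, i = (k : Int) := ⟨i.toNat, by omega⟩
  have hdiv : 2 * (s.length / 2) ≤ s.length := by omega
  have hk1 : 1 ≤ k := by omega
  have hk2 : 2 * k ≤ s.length := by
    have : (k : Int) ≤ ((s.length / 2 : Nat) : Int) := by omega
    omega
  rw [Bool.eq_iff_iff]
  rw [show (((PySem.List.slice s (some ((s.length : Int) - (k : Int))) none ==
      PySem.List.slice s (some ((s.length : Int) - 2 * (k : Int))) (some ((s.length : Int) - (k : Int))))) = true) ↔
      (∀ tn : Nat, tn < k → s[s.length - 1 - tn]? = s[s.length - 1 - k - tn]?) from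
      pv_sliceeq_iff s k hk1 hk2]
  rw [show ((pv_mrun s (s.length : Int) (k : Int) 0 ((k : Int)).toNat == (k : Int)) = true) ↔
      (pv_mrun s (s.length : Int) (k : Int) 0 ((k : Int)).toNat = (k : Int)) from beq_iff_eq]
  exact (pv_mrun_spec s k hk1 hk2).symm

theorem pv_sq_eq (s : List Int) : pv_sq_at_end s = ! pv_is_valid s := by
  rw [pv_valid_eq, Bool.not_not]

-- ===== B-side: the loop equals the reference search =====
theorem pv_loop_succ (f : Nat) (n : Int) (seq : List Int) (cand : Int) :
    pv_loop (f + 1) n seq cand =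
      if (seq.length : Int) < n then
        if cand ≤ 6 then
          if pv_sq_at_end (seq ++ [cand]) then pv_loop f n seq (cand + 1)
          else pv_loop f n (seq ++ [cand]) 4
        else if seq.isEmpty then seq
        else pv_loop f n seq.dropLast (seq.getLastD 0 + 1)
      else seq := rfl

theorem pvC_ge (k : Nat) : 16 ≤ pvC k := by
  unfold pvC
  calc (16 : Nat) = 4 ^ 2 := by norm_num
  _ ≤ 4 ^ (k + 2) := Nat.pow_le_pow_right (by norm_num) (by omega)

theorem pvC_succ (k : Nat) : pvC (k + 1) = 4 * pvC k := by
  unfold pvC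
  rw [show k + 1 + 2 = (k + 2) + 1 from rfl, pow_succ]
  ring

theorem pv_level (n : Int) : ∀ (k : Nat) (seq : List Int) (m : Nat) (cand : Int) (F : Nat),
    (seq.length : Int) < n → (n - seq.length).toNat = k + 1 →
    cand = 7 - (m : Int) → m ≤ 3 → m * (pvC k + 2) + 1 ≤ F →
    (match pvTry n seq cand with
     | some r => pv_loop F n seq cand = r
     | none => ∃ F', 1 ≤ F' ∧ F ≤ F' + m * (pvC k + 2) ∧
         pv_loop F n seq cand = pv_loop F' n seq 7) := by
  intro k
  induction k with
  | zero =>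
    intro seq m
    induction m with
    | zero =>
      intro cand F hlen hk hcand hm hF
      have h7 : cand = 7 := by push_cast at hcand; omega
      subst h7
      rw [pvTry_seven]
      exact ⟨F, by omega, by omega, rfl⟩
    | succ m ihm =>
      intro cand F hlen hk hcand hm hF
      have hC := pvC_ge 0
      have hmul : (m + 1) * (pvC 0 + 2) = m * (pvC 0 + 2) + (pvC 0 + 2) := by ring
      have hc4 : 4 ≤ cand := by push_cast at hcand; omega
      have hc6 : cand ≤ 6 := by push_cast at hcand; omega
      have hend : ((seq ++ [cand]).length : Int) = n := by
        simp only [List.length_append, List.length_cons, List.length_nil]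
        push_cast; omega
      obtain ⟨F₀, rfl⟩ : ∃ F₀, F = F₀ + 1 := ⟨F - 1, by omega⟩
      rw [pvTry_cons n seq cand hc4 hc6]
      by_cases hv : pv_is_valid (seq ++ [cand])
      · -- the child is complete: success with value seq ++ [cand]
        have hext : pvExtC n (seq ++ [cand]) = some (seq ++ [cand]) := by
          unfold pvExtC
          rw [show (n - ((seq ++ [cand]).length : Int)).toNat = 0 from by omega]
          rw [pvExt, if_pos hend]
        rw [if_pos hv, hext]
        show pv_loop (F₀ + 1) n seq cand = seq ++ [cand]
        rw [pv_loop_succ, if_pos hlen, if_pos hc6, pv_sq_eq, if_neg (by simp [hv])]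
        obtain ⟨F₁, rfl⟩ : ∃ F₁, F₀ = F₁ + 1 := ⟨F₀ - 1, by omega⟩
        rw [pv_loop_succ, if_neg (by omega)]
      · -- invalid child: move to the next candidate
        rw [if_neg hv]
        have hstep : pv_loop (F₀ + 1) n seq cand = pv_loop F₀ n seq (cand + 1) := by
          rw [pv_loop_succ, if_pos hlen, if_pos hc6, pv_sq_eq, if_pos (by simp [hv])]
        have hrec := ihm (cand + 1) F₀ hlen hk (by push_cast at hcand ⊢; omega) (by omega) (by omega)
        cases htry : pvTry n seq (cand + 1) with
        | some r =>
          rw [htry] at hrec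
          show pv_loop (F₀ + 1) n seq cand = r
          rw [hstep]; exact hrec
        | none =>
          rw [htry] at hrec
          obtain ⟨F', hF'1, hF'2, hF'3⟩ := hrec
          exact ⟨F', hF'1, by omega, by rw [hstep]; exact hF'3⟩
  | succ k ihk =>
    intro seq m
    induction m with
    | zero =>
      intro cand F hlen hk hcand hm hF
      have h7 : cand = 7 := by push_cast at hcand; omega
      subst h7
      rw [pvTry_seven]
      exact ⟨F, by omega, by omega, rfl⟩
    | succ m ihm =>
      intro cand F hlen hk hcand hm hF
      have hC := pvC_ge k
      have hC4 := pvC_succ k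
      have hmul : (m + 1) * (pvC (k + 1) + 2) = m * (pvC (k + 1) + 2) + (pvC (k + 1) + 2) := by ring
      have hc4 : 4 ≤ cand := by push_cast at hcand; omega
      have hc6 : cand ≤ 6 := by push_cast at hcand; omega
      have hlen' : ((seq ++ [cand]).length : Int) < n := by
        simp only [List.length_append, List.length_cons, List.length_nil]
        push_cast; omega
      have hkc : (n - ((seq ++ [cand]).length : Int)).toNat = k + 1 := by
        simp only [List.length_append, List.length_cons, List.length_nil]
        push_cast; omega
      obtain ⟨F₀, rfl⟩ : ∃ F₀, F = F₀ + 1 := ⟨F - 1, by omega⟩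
      rw [pvTry_cons n seq cand hc4 hc6]
      by_cases hv : pv_is_valid (seq ++ [cand])
      · -- valid child: descend (outer induction hypothesis at the child)
        rw [if_pos hv, pvExtC_unfold n (seq ++ [cand]) hlen']
        have hdesc : pv_loop (F₀ + 1) n seq cand = pv_loop F₀ n (seq ++ [cand]) 4 := by
          rw [pv_loop_succ, if_pos hlen, if_pos hc6, pv_sq_eq, if_neg (by simp [hv])]
        have hsub := ihk (seq ++ [cand]) 3 4 F₀ hlen' hkc (by norm_num) (by omega) (by omega)
        cases htry : pvTry n (seq ++ [cand]) 4 with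
        | some r =>
          rw [htry] at hsub
          show pv_loop (F₀ + 1) n seq cand = r
          rw [hdesc]; exact hsub
        | none =>
          rw [htry] at hsub
          obtain ⟨F'', hF''1, hF''2, hF''3⟩ := hsub
          obtain ⟨F₁, rfl⟩ : ∃ F₁, F'' = F₁ + 1 := ⟨F'' - 1, by omega⟩
          -- pop back from the failed child
          rw [pv_loop_succ, if_pos hlen', if_neg (by omega), if_neg (by simp),
              List.dropLast_concat, List.getLastD_concat] at hF''3
          have hrec := ihm (cand + 1) F₁ hlen hk (by push_cast at hcand ⊢; omega) (by omega) (by omega)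
          cases htry2 : pvTry n seq (cand + 1) with
          | some r =>
            rw [htry2] at hrec
            show pv_loop (F₀ + 1) n seq cand = r
            rw [hdesc, hF''3]; exact hrec
          | none =>
            rw [htry2] at hrec
            obtain ⟨F', hF'1, hF'2, hF'3⟩ := hrec
            refine ⟨F', hF'1, by omega, ?_⟩
            rw [hdesc, hF''3]; exact hF'3
      · -- invalid child: next candidate
        rw [if_neg hv]
        have hstep : pv_loop (F₀ + 1) n seq cand = pv_loop F₀ n seq (cand + 1) := by
          rw [pv_loop_succ, if_pos hlen, if_pos hc6, pv_sq_eq, if_pos (by simp [hv])]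
        have hrec := ihm (cand + 1) F₀ hlen hk (by push_cast at hcand ⊢; omega) (by omega) (by omega)
        cases htry : pvTry n seq (cand + 1) with
        | some r =>
          rw [htry] at hrec
          show pv_loop (F₀ + 1) n seq cand = r
          rw [hstep]; exact hrec
        | none =>
          rw [htry] at hrec
          obtain ⟨F', hF'1, hF'2, hF'3⟩ := hrec
          exact ⟨F', hF'1, by omega, by rw [hstep]; exact hF'3⟩

theorem find_min_sequence_alt_eq_ext (n : Int) (hn : 0 ≤ n) :
    find_min_sequence_alt n =
      (match pvExt (n.toNat + 1) n [] with | some r => r | none => []) := by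
  by_cases h0 : n = 0
  · subst h0; decide
  · have hpos : 0 < n := by omega
    unfold find_min_sequence_alt
    obtain ⟨k, hkeq⟩ : ∃ k, n.toNat = k + 1 := ⟨n.toNat - 1, by omega⟩
    have hC := pvC_ge k
    have hlev := pv_level n k [] 3 4 (4 ^ (n.toNat + 3)) (by simpa using hpos)
      (by simp only [List.length_nil]; omega) (by norm_num) (by omega)
      (by
        have hpow : pvC k ≤ 4 ^ (n.toNat + 2) := by
          unfold pvC
          exact Nat.pow_le_pow_right (by norm_num) (by omega)
        have hsp : 4 ^ (n.toNat + 3) = 4 * 4 ^ (n.toNat + 2) := by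
          rw [show n.toNat + 3 = (n.toNat + 2) + 1 from rfl, pow_succ]; ring
        have h16 : 16 ≤ 4 ^ (n.toNat + 2) := by
          calc (16 : Nat) = 4 ^ 2 := by norm_num
          _ ≤ 4 ^ (n.toNat + 2) := Nat.pow_le_pow_right (by norm_num) (by omega)
        omega)
    have hroot : pvTry n [] 4 = pvExt (n.toNat + 1) n [] := by
      rw [← pvExtC_unfold n [] (by simpa using hpos)]
      unfold pvExtC
      rw [show (n - (([] : List Int).length : Int)).toNat = n.toNat from by simp]
    rw [hroot] at hlev
    cases hext : pvExt (n.toNat + 1) n [] with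
    | some r => rw [hext] at hlev; exact hlev
    | none =>
      rw [hext] at hlev
      obtain ⟨F', hF'1, _, hF'3⟩ := hlev
      rw [hF'3]
      obtain ⟨F₁, rfl⟩ : ∃ F₁, F' = F₁ + 1 := ⟨F' - 1, by omega⟩
      rw [pv_loop_succ, if_pos (by simpa using hpos), if_neg (by omega), if_pos (by simp)]

-- ===== VERDICT (by name: the statement is the Claim_ definition above) =====
theorem find_min_sequence_spec : Claim_equal_find_min_sequence := by
  intro n _ hp
  unfold Spec_find_min_sequence
  rw [find_min_sequence_eq_ext, find_min_sequence_alt_eq_ext n hp]
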